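-- pv_equiv track=rewrite | github.com/lukaschare/flower003 | fedits-tool/scripts/dump_py_sh_to_md_copy_02.py | choose_fence
-- ===== SOURCE A (Python) =====
-- def choose_fence(content: str) -> str:
--     """防止 Markdown 代码块冲突，动态选择反引号长度"""
--     max_run = 0
--     run = 0
--     for ch in content:
--         if ch == "`":
--             run += 1
--             max_run = max(max_run, run)
--         else:
--             run = 0
--     fence_len = max(3, max_run + 1)
--     return "`" * fence_len
-- ===== SOURCE B (Python) =====
-- import re
--
--
-- def choose_fence(content: str) -> str:
--     """防止 Markdown 代码块冲突，动态选择反引号长度"""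
--     runs = re.findall(r"`+", content)
--     max_run = max((len(r) for r in runs), default=0)
--     return "`" * max(3, max_run + 1)
-- ===== Notes on version B (the rewrite author's own statement) =====
-- stated objective: idiomatic
-- what changed: Replaces the stateful char-by-char running-max loop by a regex findall of all maximal backtick runs followed by a max-reduce over their lengths.
import Mathlib
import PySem

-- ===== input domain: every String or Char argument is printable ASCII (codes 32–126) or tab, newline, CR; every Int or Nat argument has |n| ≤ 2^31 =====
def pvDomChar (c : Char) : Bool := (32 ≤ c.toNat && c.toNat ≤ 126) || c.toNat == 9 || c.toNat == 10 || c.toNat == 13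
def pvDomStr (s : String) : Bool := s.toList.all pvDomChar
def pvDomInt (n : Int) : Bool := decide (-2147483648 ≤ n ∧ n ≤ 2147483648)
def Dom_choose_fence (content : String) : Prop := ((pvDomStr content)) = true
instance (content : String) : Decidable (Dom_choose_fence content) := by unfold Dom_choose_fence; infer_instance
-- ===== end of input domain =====

-- ===== PORT A =====
-- B replaces A's stateful running-max loop by find-all-backtick-runs then a max-reduce (same result, idiomatic decomposition).

-- A's loop: state (max_run, run), one step per character, same branch order as the Python.
def chooseFenceLoopA : List Char → Nat → Nat → Nat
  | [], max_run, _ => max_run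
  | ch :: rest, max_run, run =>
    if ch = '`' then chooseFenceLoopA rest (max max_run (run + 1)) (run + 1)
    else chooseFenceLoopA rest max_run 0

def choose_fence (content : String) : String :=
  let max_run := chooseFenceLoopA content.toList 0 0
  let fence_len := max 3 (max_run + 1)
  String.ofList (List.replicate fence_len '`')

-- ===== PORT B =====
-- re.findall(r"`+", content): the list of maximal runs of backticks, in order.
def findTickRuns : List Char → List (List Char)
  | [] => []
  | c :: cs =>
    if c = '`' then
      (c :: cs.takeWhile (· = '`')) :: findTickRuns (cs.dropWhile (· = '`'))
    else findTickRuns cs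
termination_by l => l.length
decreasing_by
  · simpa using Nat.lt_succ_of_le (cs.length_dropWhile_le (· = '`'))
  · simp

def choose_fence_alt (content : String) : String :=
  let runs := findTickRuns content.toList
  -- max((len(r) for r in runs), default=0)
  let max_run := runs.foldl (fun m r => max m r.length) 0
  String.ofList (List.replicate (max 3 (max_run + 1)) '`')

-- ===== PRECONDITION & SPEC =====
def Spec_choose_fence (content : String) (out : String) : Prop := out = choose_fence_alt content
instance (content : String) (out : String) : Decidable (Spec_choose_fence content out) := by unfold Spec_choose_fence; infer_instance

-- ===== CLAIM (what is proved, stated in full; the proofs are below) =====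
def Claim_equal_choose_fence : Prop := ∀ (content : String), Dom_choose_fence content → Spec_choose_fence content (choose_fence content)

-- ===== LEMMAS AND PROOFS =====

-- max over run lengths, with accumulator pulled out of the fold
def maxRunLen (l : List Char) : Nat :=
  (findTickRuns l).foldl (fun m r => max m r.length) 0

theorem foldl_max_len_init (rs : List (List Char)) (a : Nat) :
    rs.foldl (fun m r => max m r.length) a =
      max a (rs.foldl (fun m r => max m r.length) 0) := by
  induction rs generalizing a with
  | nil => simp
  | cons r rs ih =>
    simp only [List.foldl_cons]
    rw [ih (max a r.length), ih (max 0 r.length)]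
    simp [Nat.max_assoc]

theorem maxRunLen_decomp (l : List Char) :
    maxRunLen l = max (l.takeWhile (· = '`')).length (maxRunLen (l.dropWhile (· = '`'))) := by
  cases l with
  | nil => simp [maxRunLen, findTickRuns]
  | cons c cs =>
    by_cases hc : c = '`'
    · subst hc
      simp only [maxRunLen, findTickRuns, if_true, List.takeWhile_cons, List.dropWhile_cons,
        decide_true, List.foldl_cons, List.length_cons, Nat.zero_max]
      exact foldl_max_len_init _ _
    · simp [maxRunLen, findTickRuns, hc]

theorem maxRunLen_cons_ne {c : Char} (cs : List Char) (hc : ¬ c = '`') :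
    maxRunLen (c :: cs) = maxRunLen cs := by
  simp [maxRunLen, findTickRuns, hc]

theorem loopA_spec (l : List Char) (m r : Nat) (hrm : r ≤ m) :
    chooseFenceLoopA l m r =
      max m (max (r + (l.takeWhile (· = '`')).length) (maxRunLen (l.dropWhile (· = '`')))) := by
  induction l generalizing m r with
  | nil =>
    simp [chooseFenceLoopA, maxRunLen, findTickRuns]
    omega
  | cons c cs ih =>
    by_cases hc : c = '`'
    · subst hc
      rw [chooseFenceLoopA, if_pos rfl, ih _ _ (le_max_right m (r + 1))]
      simp
      omega
    · rw [chooseFenceLoopA, if_neg hc, ih _ _ (Nat.zero_le m), Nat.zero_add,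
        ← maxRunLen_decomp cs]
      simp [hc, maxRunLen_cons_ne cs hc]
      omega

theorem loopA_eq_maxRunLen (l : List Char) :
    chooseFenceLoopA l 0 0 = maxRunLen l := by
  rw [loopA_spec l 0 0 (le_refl 0), maxRunLen_decomp l]
  simp

-- ===== VERDICT (by name: the statement is the Claim_ definition above) =====
theorem choose_fence_spec : Claim_equal_choose_fence := by
  intro content _
  unfold Spec_choose_fence choose_fence choose_fence_alt
  simp only [loopA_eq_maxRunLen]
  rfl
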